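-- pv_equiv track=rewrite | github.com/KINOX0924/Programmers_codingtest | 프로그래머스/0/181838. 날짜 비교하기/날짜 비교하기.py | solution
-- ===== SOURCE A (Python) =====
-- def solution(date1, date2):
--
--     for index in range(0 , len(date1)) :
--         if index == 0 :
--             if date1[index] < date2[index] :
--                 return 1
--             elif date1[index] > date2[index] :
--                 return 0
--         elif index == 1 :
--             if date1[index] < date2[index] :
--                 return 1
--             elif date1[index] > date2[index] :
--                 return 0
--         elif index == 2 :
--             if date1[index] < date2[index] :
--                 return 1
--             else :
--                 return 0
-- ===== SOURCE B (Python) =====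
-- def solution(date1, date2):
--     return 1 if date1 < date2 else 0
-- ===== Notes on version B (the rewrite author's own statement) =====
-- stated objective: idiomatic
-- what changed: Replaces the manual per-index loop with per-index branch cascade by Python's built-in lexicographic list comparison in a single expression.
-- outside the precondition, e.g. on solution([1, 2, 3], [1, 2, 3, 4]): A returns 0, B returns 1; on solution([1, 2], [1, 2, 3]): A returns None, B returns 1
import Mathlib
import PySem

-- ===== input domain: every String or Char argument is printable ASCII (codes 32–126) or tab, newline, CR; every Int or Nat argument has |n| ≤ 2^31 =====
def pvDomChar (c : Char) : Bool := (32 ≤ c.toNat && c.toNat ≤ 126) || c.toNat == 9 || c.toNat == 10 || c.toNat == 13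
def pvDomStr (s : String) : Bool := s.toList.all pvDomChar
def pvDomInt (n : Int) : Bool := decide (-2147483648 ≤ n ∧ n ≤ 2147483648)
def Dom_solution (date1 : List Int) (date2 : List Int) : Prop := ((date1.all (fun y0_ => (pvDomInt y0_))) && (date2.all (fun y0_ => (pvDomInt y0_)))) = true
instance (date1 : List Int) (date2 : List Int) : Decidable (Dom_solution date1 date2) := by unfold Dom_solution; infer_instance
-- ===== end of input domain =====

-- B replaces A's manual index loop and branch cascade by built-in lexicographic list comparison (idiomatic, same cost).

-- ===== PORT A =====
-- literal port of A's loop: `none` is Python falling through (returns None) or an IndexError; both lie outside Pre_solution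
def solutionLoop (date1 : List Int) (date2 : List Int) : List Int → Option Int
  | [] => none
  | index :: rest =>
    if index = 0 then
      match PySem.List.pyGet? date1 index, PySem.List.pyGet? date2 index with
      | some a, some b =>
          if a < b then some 1 else if a > b then some 0 else solutionLoop date1 date2 rest
      | _, _ => none
    else if index = 1 then
      match PySem.List.pyGet? date1 index, PySem.List.pyGet? date2 index with
      | some a, some b =>
          if a < b then some 1 else if a > b then some 0 else solutionLoop date1 date2 rest
      | _, _ => none
    else if index = 2 then
      match PySem.List.pyGet? date1 index, PySem.List.pyGet? date2 index with
      | some a, some b => if a < b then some 1 else some 0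
      | _, _ => none
    else solutionLoop date1 date2 rest

def solution (date1 : List Int) (date2 : List Int) : Int :=
  (solutionLoop date1 date2 (PySem.List.pyRange 0 (date1.length : Int) 1)).getD 0

-- ===== PORT B =====
-- Python's built-in list `<` (lexicographic, strict)
def listLt : List Int → List Int → Bool
  | [], [] => false
  | [], _ :: _ => true
  | _ :: _, [] => false
  | a :: as, b :: bs => if a < b then true else if b < a then false else listLt as bs

def solution_alt (date1 : List Int) (date2 : List Int) : Int :=
  if listLt date1 date2 then 1 else 0

-- ===== PRECONDITION & SPEC =====
-- Pre_ admits the inputs on which A returns an int and that int is lexicographic comparison: either the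
-- dates first differ at an index < 3 that both lists reach, or the lists are equal with length ≥ 3; it
-- excludes inputs where A falls through returning None (no Int), raises IndexError, or — the lists agreeing
-- on the first three entries but not beyond — A's indices-0..2-only comparison disagrees with full
-- lexicographic order (a 3-element date never has a fourth entry).
def Pre_solution (date1 : List Int) (date2 : List Int) : Prop :=
  (date1 = date2 ∧ 3 ≤ date1.length) ∨
  ∃ i < 3, date1[i]? ≠ date2[i]? ∧ date1[i]? ≠ none ∧ date2[i]? ≠ none ∧
    ∀ j < i, date1[j]? = date2[j]?
instance (date1 : List Int) (date2 : List Int) : Decidable (Pre_solution date1 date2) := by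
  unfold Pre_solution; infer_instance

def pvWitness_solution : List Int × List Int := ([2021, 12, 28], [2021, 12, 29])

def Spec_solution (date1 : List Int) (date2 : List Int) (out : Int) : Prop := out = solution_alt date1 date2
instance (date1 : List Int) (date2 : List Int) (out : Int) : Decidable (Spec_solution date1 date2 out) := by unfold Spec_solution; infer_instance

-- ===== CLAIM (what is proved, stated in full; the proofs are below) =====
def Claim_equal_solution : Prop := ∀ (date1 : List Int) (date2 : List Int), Dom_solution date1 date2 → Pre_solution date1 date2 → Spec_solution date1 date2 (solution date1 date2)

-- ===== LEMMAS AND PROOFS =====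

theorem listLt_self (l : List Int) : listLt l l = false := by
  induction l with
  | nil => rfl
  | cons a t ih => simp [listLt, ih]

theorem pyRange_head3 (n : Nat) (h : 3 ≤ n) :
    PySem.List.pyRange 0 (n : Int) 1 = 0 :: 1 :: 2 :: PySem.List.pyRange 3 (n : Int) 1 := by
  rw [PySem.List.pyRange_one_cons (by exact_mod_cast h.trans_lt' (by norm_num)),
      PySem.List.pyRange_one_cons (by exact_mod_cast (by omega : (1:Int) < (n:Int)) ),
      PySem.List.pyRange_one_cons (by exact_mod_cast (by omega : (2:Int) < (n:Int)) )]
  norm_num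

-- ===== VERDICT (by name: the statement is the Claim_ definition above) =====
theorem solution_spec : Claim_equal_solution := by
  intro date1 date2 _ hpre
  unfold Spec_solution solution solution_alt
  rcases hpre with ⟨rfl, hlen⟩ | ⟨i, hi3, hne, h1, h2, hpref⟩
  · -- equal lists of length ≥ 3: A returns 0 at index 2, B returns 0
    match date1, hlen with
    | a :: b :: c :: t, _ =>
      rw [show ((a :: b :: c :: t).length : Int) = ((t.length + 3 : Nat) : Int) by simp; omega,
          pyRange_head3 _ (by omega)]
      simp [solutionLoop, PySem.List.pyGet?_of_nonneg, listLt_self]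
  · -- first difference at index i < 3, reached by both lists
    interval_cases i
    · -- i = 0
      match date1, date2, h1, h2 with
      | x :: xs, y :: ys, _, _ =>
        have hxy : x ≠ y := by simpa using hne
        rw [show ((x :: xs).length : Int) = ((xs.length + 1 : Nat) : Int) by simp,
            PySem.List.pyRange_one_cons (by exact_mod_cast (by omega : (0:Int) < (xs.length + 1 : Nat)))]
        rcases lt_trichotomy x y with h | h | h
        · simp [solutionLoop, listLt, h]
        · exact absurd h hxy
        · simp [solutionLoop, listLt, h, asymm h]
    · -- i = 1
      match date1, date2, h1, h2 with
      | x :: x2 :: xs, y :: y2 :: ys, _, _ =>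
        have hx : x = y := by simpa using hpref 0 (by omega)
        subst hx
        have hxy : x2 ≠ y2 := by simpa using hne
        rw [show ((x :: x2 :: xs).length : Int) = ((xs.length + 2 : Nat) : Int) by simp; omega,
            PySem.List.pyRange_one_cons (by exact_mod_cast (by omega : (0:Int) < (xs.length + 2 : Nat))),
            PySem.List.pyRange_one_cons (by exact_mod_cast (by omega : (0+1:Int) < (xs.length + 2 : Nat)))]
        rcases lt_trichotomy x2 y2 with h | h | h
        · simp [solutionLoop, listLt, PySem.List.pyGet?_of_nonneg, h]
        · exact absurd h hxy
        · simp [solutionLoop, listLt, PySem.List.pyGet?_of_nonneg, h, asymm h]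
    · -- i = 2
      match date1, date2, h1, h2 with
      | x :: x2 :: x3 :: xs, y :: y2 :: y3 :: ys, _, _ =>
        have hx : x = y := by simpa using hpref 0 (by omega)
        have hx2 : x2 = y2 := by simpa using hpref 1 (by omega)
        subst hx; subst hx2
        have hxy : x3 ≠ y3 := by simpa using hne
        rw [show ((x :: x2 :: x3 :: xs).length : Int) = ((xs.length + 3 : Nat) : Int) by simp; omega,
            pyRange_head3 _ (by omega)]
        rcases lt_trichotomy x3 y3 with h | h | h
        · simp [solutionLoop, listLt, PySem.List.pyGet?_of_nonneg, h]
        · exact absurd h hxy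
        · simp [solutionLoop, listLt, PySem.List.pyGet?_of_nonneg, h, asymm h]
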